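-- pv_equiv track=rewrite | github.com/francis-gretz/genepy | dyck-words.py | is_a_dyck_word
-- ===== SOURCE A (Python) =====
-- def is_a_dyck_word(word: str) -> bool:
--
--     index = 0
--
--     starting_character = "."
--     set_ending_character = False
--     ending_character = "."
--
--     open_brackets = 0
--
--     for ch in word:
--         if index == 0:
--             starting_character = ch  # Get starting_character
--
--         if ch == starting_character:
--             open_brackets = open_brackets + 1
--         else:
--             if set_ending_character:
--                 if ch != ending_character:
--                     return False  # More than 2 characters
--             else:
--                 set_ending_character = True
--                 ending_character = ch  # Get ending_character
--
--         if ch == ending_character and set_ending_character: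
--             if open_brackets > 0:
--                 open_brackets = open_brackets - 1  # Close bracket
--             else:
--                 return False
--
--         index = index + 1
--
--     return open_brackets == 0
-- ===== SOURCE B (Python) =====
-- def is_a_dyck_word(word: str) -> bool:
--     if not word:
--         return True
--     opener = word[0]
--     closer = next((c for c in word if c != opener), None)
--     if closer is None:
--         return False
--     pair = opener + closer
--     while pair in word:
--         word = word.replace(pair, "")
--     return not word
-- ===== Notes on version B (the rewrite author's own statement) =====
-- stated objective: alternative
-- what changed: A's single streaming pass with an index/flag state machine and a running bracket counter is replaced by classic pair-cancellation string rewriting: find the closer as the first non-opening character, then repeatedly delete every occurrence of the substring opener+closer until none remains, and accept iff the word has been erased completely.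
import Mathlib
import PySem

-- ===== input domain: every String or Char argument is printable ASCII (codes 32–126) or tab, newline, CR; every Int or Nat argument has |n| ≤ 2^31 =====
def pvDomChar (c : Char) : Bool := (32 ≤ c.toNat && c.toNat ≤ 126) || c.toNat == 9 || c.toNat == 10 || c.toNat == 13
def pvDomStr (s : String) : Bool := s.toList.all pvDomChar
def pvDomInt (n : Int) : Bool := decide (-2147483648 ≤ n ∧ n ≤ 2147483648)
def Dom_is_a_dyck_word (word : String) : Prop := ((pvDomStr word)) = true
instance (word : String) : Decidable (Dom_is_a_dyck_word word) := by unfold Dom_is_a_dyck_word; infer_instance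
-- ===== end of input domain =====

-- B replaces A's streaming index/flag/counter state machine by pair-cancellation rewriting:
-- repeatedly erase every occurrence of opener+closer and accept iff the word is erased; objective: alternative.


-- ===== PORT A =====
-- the for-loop of A: state (index, starting_character, set_ending_character, ending_character,
-- open_brackets); `none` in the inner match models A's `return False` for a third distinct character
def dyckLoopA : List Char → Int → Char → Bool → Char → Int → Bool
  | [], _, _, _, _, ob => decide (ob = 0)
  | ch :: rest, index, start, setEnd, endc, ob =>
    let start := if index = 0 then ch else start
    match (if ch = start then some (setEnd, endc, ob + 1)
           else if setEnd then (if ch ≠ endc then none else some (setEnd, endc, ob))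
           else some (true, ch, ob)) with
    | none => false
    | some (setEnd, endc, ob) =>
      if ch = endc ∧ setEnd then
        if ob > 0 then dyckLoopA rest (index + 1) start setEnd endc (ob - 1)
        else false
      else dyckLoopA rest (index + 1) start setEnd endc ob

def is_a_dyck_word (word : String) : Bool :=
  dyckLoopA word.toList 0 '.' false '.' 0

-- ===== PORT B =====
-- Source B cancels the two-character substring opener+closer with str.replace until none is left.
-- The three definitions/lemmas before the loop only characterise PySem.Chars.replace for a
-- two-character pattern and empty replacement; the loop's decreasing_by cites them by name.
def dyckRepl (o c : Char) : List Char → List Char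
  | a :: b :: t => if a = o ∧ b = c then dyckRepl o c t else a :: dyckRepl o c (b :: t)
  | l => l

theorem dyckRepl_nil (o c : Char) : dyckRepl o c [] = [] := rfl
theorem dyckRepl_one (o c a : Char) : dyckRepl o c [a] = [a] := rfl
theorem dyckRepl_cons2 (o c a b : Char) (t : List Char) :
    dyckRepl o c (a :: b :: t) = if a = o ∧ b = c then dyckRepl o c t else a :: dyckRepl o c (b :: t) := rfl

theorem dyckRepl_length_le (o c : Char) : ∀ l : List Char, (dyckRepl o c l).length ≤ l.length
  | [] => by simp [dyckRepl_nil]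
  | [a] => by simp [dyckRepl_one]
  | a :: b :: t => by
    rw [dyckRepl_cons2]
    by_cases h : a = o ∧ b = c
    · rw [if_pos h]
      have := dyckRepl_length_le o c t
      simp only [List.length_cons]; omega
    · rw [if_neg h]
      have := dyckRepl_length_le o c (b :: t)
      simp only [List.length_cons] at this ⊢; omega

theorem dyckRepl_shrink (o c : Char) : ∀ l : List Char, [o, c] <:+: l →
    (dyckRepl o c l).length + 2 ≤ l.length
  | [], h => by simp at h
  | [a], h => by
    rcases h with ⟨s, t, hst⟩
    have := congrArg List.length hst; simp at this; omega
  | a :: b :: t, h => by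
    rw [dyckRepl_cons2]
    by_cases hab : a = o ∧ b = c
    · rw [if_pos hab]
      have := dyckRepl_length_le o c t
      simp only [List.length_cons]; omega
    · have h' : [o, c] <:+: b :: t := by
        rcases (List.infix_cons_iff).mp h with hp | hi
        · exfalso
          rcases (List.cons_prefix_cons).mp hp with ⟨hao, hp2⟩
          rcases (List.cons_prefix_cons).mp hp2 with ⟨hbc, -⟩
          exact hab ⟨hao.symm, hbc.symm⟩
        · exact hi
      rw [if_neg hab]
      have := dyckRepl_shrink o c (b :: t) h'
      simp only [List.length_cons] at this ⊢; omega

theorem dyckGo_eq (o c : Char) : ∀ (fuel : Nat) (l acc : List Char), l.length ≤ fuel →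
    PySem.Chars.replace.go [o, c] [] fuel l acc = acc.reverse ++ dyckRepl o c l := by
  intro fuel
  induction fuel with
  | zero =>
    intro l acc hl
    have : l = [] := List.eq_nil_of_length_eq_zero (by omega)
    subst this
    simp [PySem.Chars.replace.go, dyckRepl_nil]
  | succ n ih =>
    intro l acc hl
    match l with
    | [] => simp [PySem.Chars.replace.go, dyckRepl_nil]
    | a :: t =>
      simp only [PySem.Chars.replace.go]
      by_cases hpre : [o, c].isPrefixOf (a :: t) = true
      · rw [if_pos hpre]
        have hp : [o, c] <+: a :: t := List.isPrefixOf_iff_prefix.mp hpre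
        rcases (List.cons_prefix_cons).mp hp with ⟨hao, hp2⟩
        match t, hp2 with
        | b :: t', hp2 =>
          rcases (List.cons_prefix_cons).mp hp2 with ⟨hbc, -⟩
          have hlen : t'.length ≤ n := by simp at hl; omega
          have hdrop : List.drop [o, c].length (a :: b :: t') = t' := rfl
          rw [hdrop, ih _ _ hlen]
          rw [dyckRepl_cons2, if_pos ⟨hao.symm, hbc.symm⟩]
          simp
      · rw [if_neg hpre]
        have hlen : t.length ≤ n := by simp at hl; omega
        rw [ih _ _ hlen]
        have hrepl : dyckRepl o c (a :: t) = a :: dyckRepl o c t := by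
          match t with
          | [] => rw [dyckRepl_one, dyckRepl_nil]
          | b :: t' =>
            have hab : ¬ (a = o ∧ b = c) := by
              intro ⟨hao, hbc⟩
              apply hpre
              subst hao; subst hbc
              rw [List.isPrefixOf_iff_prefix]
              exact List.cons_prefix_cons.mpr ⟨rfl, List.cons_prefix_cons.mpr ⟨rfl, List.nil_prefix⟩⟩
            rw [dyckRepl_cons2, if_neg hab]
        rw [hrepl]
        simp

theorem dyckReplace_eq (o c : Char) (l : List Char) :
    PySem.Chars.replace l [o, c] [] = dyckRepl o c l := by
  have : ([o, c] : List Char).isEmpty = false := rfl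
  simp only [PySem.Chars.replace, this, Bool.false_eq_true, if_false]
  exact dyckGo_eq o c l.length l [] le_rfl

-- the while-loop of Source B: `while pair in word: word = word.replace(pair, "")`
def dyckCancelLoop (o c : Char) (w : List Char) : List Char :=
  if PySem.Chars.isIn [o, c] w = true then
    dyckCancelLoop o c (PySem.Chars.replace w [o, c] [])
  else w
termination_by w.length
decreasing_by
  rename_i h
  rw [dyckReplace_eq]
  have := dyckRepl_shrink o c w ((PySem.Chars.isIn_iff_infix _ _).mp h)
  omega

-- Source B: empty → True; opener = word[0]; closer = next non-opener or None → False;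
-- cancel pair to exhaustion; return `not word`
def is_a_dyck_word_alt (word : String) : Bool :=
  match word.toList with
  | [] => true
  | opener :: _ =>
    match word.toList.find? (fun ch => ch != opener) with
    | none => false
    | some closer => decide (dyckCancelLoop opener closer word.toList = [])

-- ===== PRECONDITION & SPEC =====
def Spec_is_a_dyck_word (word : String) (out : Bool) : Prop := out = is_a_dyck_word_alt word
instance (word : String) (out : Bool) : Decidable (Spec_is_a_dyck_word word out) := by unfold Spec_is_a_dyck_word; infer_instance

-- ===== CLAIM (what is proved, stated in full; the proofs are below) =====
def Claim_equal_is_a_dyck_word : Prop := ∀ (word : String), Dom_is_a_dyck_word word → Spec_is_a_dyck_word word (is_a_dyck_word word)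

-- ===== LEMMAS AND PROOFS =====

-- the ±1 values both analyses reduce to, and the streaming balance check
def dyckVals (o : Char) (l : List Char) : List Int :=
  l.map (fun c => if c = o then (1 : Int) else -1)

def dyckRun : List Int → Int → Bool
  | [], b => decide (b = 0)
  | v :: r, b => decide (0 ≤ b + v) && dyckRun r (b + v)

-- A's loop, past the first character, on a word over two characters, is dyckRun
theorem dyckLoopA_run (o e : Char) (hoe : o ≠ e) :
    ∀ (l : List Char) (i : Int) (setEnd : Bool) (endc : Char) (ob : Int),
    1 ≤ i → 0 ≤ ob → (setEnd = true → endc = e) → (∀ c ∈ l, c = o ∨ c = e) →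
    dyckLoopA l i o setEnd endc ob = dyckRun (dyckVals o l) ob := by
  intro l
  induction l with
  | nil => intro i setEnd endc ob _ hob _ _; simp [dyckLoopA, dyckVals, dyckRun]
  | cons c rest ih =>
    intro i setEnd endc ob hi hob hend hmem
    have hi0 : ¬ (i = 0) := by omega
    have hrest : ∀ x ∈ rest, x = o ∨ x = e := fun x hx => hmem x (by simp [hx])
    rcases hmem c (by simp) with hc | hc
    · subst hc
      have hcond : ¬ (c = endc ∧ setEnd = true) := by
        rintro ⟨h1, h2⟩; exact hoe (h1.trans (hend h2) ▸ rfl)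
      simp only [dyckLoopA, if_neg hi0, dyckVals, List.map_cons, dyckRun]
      simp only [if_true, if_neg hcond]
      rw [ih (i + 1) setEnd endc (ob + 1) (by omega) (by omega) hend hrest]
      have h1 : decide (0 ≤ ob + 1) = true := by simp; omega
      simp [dyckVals, h1]
    · subst hc
      have hco : ¬ (c = o) := fun h => hoe h.symm
      have hih := fun hb => ih (i + 1) true c (ob - 1) (by omega) hb (fun _ => rfl) hrest
      simp only [dyckLoopA, if_neg hi0, dyckVals, List.map_cons, if_neg hco, dyckRun]
      cases hse : setEnd with
      | true =>
        have he : endc = c := hend hse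
        by_cases hb : ob > 0
        · simp only [he, ne_eq, not_true_eq_false, if_false, if_true, and_self, if_pos hb]
          rw [hih (by omega)]
          have h2 : ob + -1 = ob - 1 := by ring
          simp [dyckVals, h2]
          exact fun _ => by omega
        · have hob0 : ob = 0 := by omega
          subst hob0
          simp [he]
      | false =>
        by_cases hb : ob > 0
        · simp only [Bool.false_eq_true, if_false, if_true, and_self, if_pos hb]
          rw [hih (by omega)]
          have h2 : ob + -1 = ob - 1 := by ring
          simp [dyckVals, h2]
          exact fun _ => by omega
        · have hob0 : ob = 0 := by omega
          subst hob0
          simp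

-- with an ending character set, any third distinct character makes A return False
theorem dyckLoopA_badE (o endc : Char) (hoe : ¬ o = endc) :
    ∀ (l : List Char) (i : Int) (ob : Int), 1 ≤ i →
    (∃ x ∈ l, ¬ x = o ∧ ¬ x = endc) →
    dyckLoopA l i o true endc ob = false := by
  intro l
  induction l with
  | nil => intro i ob _ h; simp at h
  | cons c rest ih =>
    rintro i ob hi ⟨x, hx, hxo, hxe⟩
    have hi0 : ¬ (i = 0) := by omega
    by_cases hc : c = o
    · subst hc
      have hxr : x ∈ rest := by
        rcases List.mem_cons.mp hx with h | h
        · exact absurd h hxo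
        · exact h
      simp only [dyckLoopA, if_neg hi0, if_true, and_true, if_neg hoe]
      exact ih (i + 1) (ob + 1) (by omega) ⟨x, hxr, hxo, hxe⟩
    · by_cases hce : c = endc
      · subst hce
        have hxr : x ∈ rest := by
          rcases List.mem_cons.mp hx with h | h
          · exact absurd h hxe
          · exact h
        simp only [dyckLoopA, if_neg hi0, if_neg hc, ne_eq, not_true_eq_false, if_false,
          and_self, if_true]
        by_cases hb : ob > 0
        · simp only [if_pos hb]
          exact ih (i + 1) (ob - 1) (by omega) ⟨x, hxr, hxo, hxe⟩
        · simp [hb]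
      · simp [dyckLoopA, hi0, hc, hce]

-- with no ending character set, two distinct non-opening characters make A return False
theorem dyckLoopA_badN (o : Char) :
    ∀ (l : List Char) (i : Int) (endc : Char) (ob : Int), 1 ≤ i →
    (∃ x ∈ l, ∃ y ∈ l, ¬ x = o ∧ ¬ y = o ∧ ¬ x = y) →
    dyckLoopA l i o false endc ob = false := by
  intro l
  induction l with
  | nil => intro i endc ob _ h; simp at h
  | cons c rest ih =>
    rintro i endc ob hi ⟨x, hx, y, hy, hxo, hyo, hxy⟩
    have hi0 : ¬ (i = 0) := by omega
    by_cases hc : c = o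
    · subst hc
      have hxr : x ∈ rest := by
        rcases List.mem_cons.mp hx with h | h
        · exact absurd h hxo
        · exact h
      have hyr : y ∈ rest := by
        rcases List.mem_cons.mp hy with h | h
        · exact absurd h hyo
        · exact h
      simp only [dyckLoopA, if_neg hi0, if_true, Bool.false_eq_true, and_false, if_false]
      exact ih (i + 1) endc (ob + 1) (by omega) ⟨x, hxr, y, hyr, hxo, hyo, hxy⟩
    · obtain ⟨z, hz, hzo, hzc⟩ : ∃ z ∈ rest, ¬ z = o ∧ ¬ z = c := by
        by_cases hxc : x = c
        · have hyc : ¬ y = c := fun h => hxy (hxc.trans h.symm)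
          have hyr : y ∈ rest := by
            rcases List.mem_cons.mp hy with h | h
            · exact absurd h hyc
            · exact h
          exact ⟨y, hyr, hyo, hyc⟩
        · have hxr : x ∈ rest := by
            rcases List.mem_cons.mp hx with h | h
            · exact absurd h hxc
            · exact h
          exact ⟨x, hxr, hxo, hxc⟩
      simp only [dyckLoopA, if_neg hi0, if_neg hc, Bool.false_eq_true, if_false,
        and_self, if_true]
      by_cases hb : ob > 0
      · simp only [if_pos hb]
        exact dyckLoopA_badE o c (fun h => hc h.symm) rest (i + 1) (ob - 1) (by omega) ⟨z, hz, hzo, hzc⟩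
      · simp [hb]

-- removing the non-overlapping occurrences of [o, c] does not change the balance check
theorem dyck_repl_run (o c : Char) (hco : ¬ c = o) :
    ∀ (n : Nat) (l : List Char), l.length ≤ n → ∀ (b : Int), 0 ≤ b →
    dyckRun (dyckVals o (dyckRepl o c l)) b = dyckRun (dyckVals o l) b := by
  intro n
  induction n with
  | zero =>
    intro l hl b hb
    have : l = [] := List.eq_nil_of_length_eq_zero (by omega)
    subst this; rfl
  | succ n ih =>
    intro l hl b hb
    match l with
    | [] => rfl
    | [a] => rw [dyckRepl_one]
    | a :: a' :: t =>
      rw [dyckRepl_cons2]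
      by_cases hab : a = o ∧ a' = c
      · rw [if_pos hab]
        obtain ⟨hao, hac⟩ := hab
        rw [ih t (by simp at hl; omega) b hb]
        simp only [dyckVals, List.map_cons, dyckRun, if_pos hao, hac, if_neg hco]
        have h1 : decide (0 ≤ b + 1) = true := by simp; omega
        have h2 : b + 1 + -1 = b := by ring
        have h3 : decide (0 ≤ b + 1 + -1) = true := by simp; omega
        have hb' : decide (0 ≤ b) = true := by simp; omega
        simp only [h1, h2, hb', Bool.true_and]
      · rw [if_neg hab]
        simp only [dyckVals, List.map_cons, dyckRun]
        by_cases h0 : (0 : Int) ≤ b + (if a = o then (1 : Int) else -1)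
        · have := ih (a' :: t) (by simp at hl ⊢; omega) (b + (if a = o then (1 : Int) else -1)) h0
          simp only [dyckVals, List.map_cons] at this
          rw [this]
          simp only [dyckRun]
        · have : decide ((0 : Int) ≤ b + (if a = o then (1 : Int) else -1)) = false := by
            simp [h0]
          simp [this]

theorem dyckRepl_mem (o c z : Char) (hzo : ¬ z = o) (hzc : ¬ z = c) :
    ∀ l : List Char, z ∈ l → z ∈ dyckRepl o c l
  | [], h => h
  | [a], h => by rw [dyckRepl_one]; exact h
  | a :: a' :: t, h => by
    rw [dyckRepl_cons2]
    by_cases hab : a = o ∧ a' = c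
    · rw [if_pos hab]
      apply dyckRepl_mem o c z hzo hzc
      rcases List.mem_cons.mp h with h1 | h1
      · exact absurd (h1.trans hab.1) hzo
      · rcases List.mem_cons.mp h1 with h2 | h2
        · exact absurd (h2.trans hab.2) hzc
        · exact h2
    · rw [if_neg hab]
      rcases List.mem_cons.mp h with h1 | h1
      · simp [h1]
      · exact List.mem_cons_of_mem a (dyckRepl_mem o c z hzo hzc (a' :: t) h1)

theorem dyckRepl_subset (o c : Char) : ∀ l : List Char, ∀ x ∈ dyckRepl o c l, x ∈ l
  | [], x, h => h
  | [a], x, h => by rw [dyckRepl_one] at h; exact h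
  | a :: a' :: t, x, h => by
    rw [dyckRepl_cons2] at h
    by_cases hab : a = o ∧ a' = c
    · rw [if_pos hab] at h
      have := dyckRepl_subset o c t x h
      simp [this]
    · rw [if_neg hab] at h
      rcases List.mem_cons.mp h with h1 | h1
      · simp [h1]
      · have := dyckRepl_subset o c (a' :: t) x h1
        simp only [List.mem_cons] at this ⊢
        tauto

-- properties of the cancellation loop: balance invariant, exhaustion, membership
theorem dyck_loop_run (o c : Char) (hco : ¬ c = o) :
    ∀ (n : Nat) (w : List Char), w.length ≤ n →
    dyckRun (dyckVals o (dyckCancelLoop o c w)) 0 = dyckRun (dyckVals o w) 0 := by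
  intro n
  induction n with
  | zero =>
    intro w hw
    have : w = [] := List.eq_nil_of_length_eq_zero (by omega)
    subst this
    rw [dyckCancelLoop]
    simp [PySem.Chars.isIn_iff_infix]
  | succ n ih =>
    intro w hw
    rw [dyckCancelLoop]
    by_cases h : PySem.Chars.isIn [o, c] w = true
    · rw [if_pos h, dyckReplace_eq]
      have hshr := dyckRepl_shrink o c w ((PySem.Chars.isIn_iff_infix _ _).mp h)
      rw [ih (dyckRepl o c w) (by omega)]
      exact dyck_repl_run o c hco w.length w le_rfl 0 (by omega)
    · rw [if_neg h]

theorem dyck_loop_no_pair (o c : Char) :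
    ∀ (n : Nat) (w : List Char), w.length ≤ n → ¬ ([o, c] <:+: dyckCancelLoop o c w) := by
  intro n
  induction n with
  | zero =>
    intro w hw
    have : w = [] := List.eq_nil_of_length_eq_zero (by omega)
    subst this
    rw [dyckCancelLoop]
    simp [PySem.Chars.isIn_iff_infix]
  | succ n ih =>
    intro w hw
    rw [dyckCancelLoop]
    by_cases h : PySem.Chars.isIn [o, c] w = true
    · rw [if_pos h, dyckReplace_eq]
      have hshr := dyckRepl_shrink o c w ((PySem.Chars.isIn_iff_infix _ _).mp h)
      exact ih (dyckRepl o c w) (by omega)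
    · rw [if_neg h]
      exact (PySem.Chars.isIn_eq_false_iff _ _).mp (by simpa using h)

theorem dyck_loop_mem (o c z : Char) (hzo : ¬ z = o) (hzc : ¬ z = c) :
    ∀ (n : Nat) (w : List Char), w.length ≤ n → z ∈ w → z ∈ dyckCancelLoop o c w := by
  intro n
  induction n with
  | zero =>
    intro w hw hz
    have : w = [] := List.eq_nil_of_length_eq_zero (by omega)
    subst this; simp at hz
  | succ n ih =>
    intro w hw hz
    rw [dyckCancelLoop]
    by_cases h : PySem.Chars.isIn [o, c] w = true
    · rw [if_pos h, dyckReplace_eq]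
      have hshr := dyckRepl_shrink o c w ((PySem.Chars.isIn_iff_infix _ _).mp h)
      exact ih (dyckRepl o c w) (by omega) (dyckRepl_mem o c z hzo hzc w hz)
    · rw [if_neg h]; exact hz

theorem dyck_loop_subset (o c : Char) :
    ∀ (n : Nat) (w : List Char), w.length ≤ n → ∀ x ∈ dyckCancelLoop o c w, x ∈ w := by
  intro n
  induction n with
  | zero =>
    intro w hw x hx
    have : w = [] := List.eq_nil_of_length_eq_zero (by omega)
    subst this
    rw [dyckCancelLoop] at hx
    simp [PySem.Chars.isIn_iff_infix] at hx
  | succ n ih =>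
    intro w hw x hx
    rw [dyckCancelLoop] at hx
    by_cases h : PySem.Chars.isIn [o, c] w = true
    · rw [if_pos h, dyckReplace_eq] at hx
      have hshr := dyckRepl_shrink o c w ((PySem.Chars.isIn_iff_infix _ _).mp h)
      exact dyckRepl_subset o c w x (ih (dyckRepl o c w) (by omega) x hx)
    · rw [if_neg h] at hx; exact hx

-- a word of openers only never balances from a positive count
theorem dyck_ones (o : Char) :
    ∀ (l : List Char) (b : Int), 1 ≤ b → (∀ x ∈ l, x = o) → dyckRun (dyckVals o l) b = false
  | [], b, hb, _ => by simp [dyckVals, dyckRun]; omega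
  | a :: t, b, hb, hall => by
    have ha : a = o := hall a (by simp)
    simp only [dyckVals, List.map_cons, if_pos ha, dyckRun]
    have := dyck_ones o t (b + 1) (by omega) (fun x hx => hall x (by simp [hx]))
    simp only [dyckVals] at this
    simp [this]

-- a pair-free word headed by the opener consists of openers only
theorem dyck_pair_free_all (o c : Char) :
    ∀ t : List Char, (∀ x ∈ o :: t, x = o ∨ x = c) → ¬ ([o, c] <:+: o :: t) →
    ∀ x ∈ o :: t, x = o := by
  intro t
  induction t with
  | nil => intro _ _ x hx; simp at hx; exact hx
  | cons b t' ih =>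
    intro hcov hnp x hx
    have hb : b = o := by
      rcases hcov b (by simp) with h | h
      · exact h
      · exfalso
        apply hnp
        subst h
        exact ⟨[], t', rfl⟩
    subst hb
    have hcov' : ∀ y ∈ b :: t', y = b ∨ y = c := fun y hy => hcov y (by
      rcases List.mem_cons.mp hy with h | h
      · simp [h]
      · simp [h])
    have hnp' : ¬ ([b, c] <:+: b :: t') := fun h => hnp (h.trans (List.suffix_cons b (b :: t')).isInfix)
    rcases List.mem_cons.mp hx with h | h
    · exact h
    · exact ih hcov' hnp' x h

-- a pair-free word over {o, c} balances from 0 exactly when it is empty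
theorem dyck_no_pair_run (o c : Char) (hco : ¬ c = o) :
    ∀ w : List Char, (∀ x ∈ w, x = o ∨ x = c) → ¬ ([o, c] <:+: w) →
    dyckRun (dyckVals o w) 0 = decide (w = []) := by
  intro w hcov hnp
  match w with
  | [] => rfl
  | a :: t =>
    rcases hcov a (by simp) with ha | ha
    · subst ha
      have hallo := dyck_pair_free_all a c t hcov hnp
      simp only [dyckVals, List.map_cons, dyckRun]
      have h1 : decide ((0 : Int) ≤ 0 + 1) = true := by decide
      have := dyck_ones a t (0 + 1) (by omega) (fun x hx => hallo x (by simp [hx]))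
      simp only [dyckVals] at this
      norm_num at this
      simp [this]
    · subst ha
      have : decide ((0 : Int) ≤ 0 + -1) = false := by decide
      simp only [dyckVals, List.map_cons, if_neg hco, dyckRun, this, Bool.false_and]
      simp

-- a character different from a given one (for the all-opener case)
def dyckOther (a : Char) : Char := if a = 'a' then 'b' else 'a'

theorem dyckOther_ne (a : Char) : a ≠ dyckOther a := by
  unfold dyckOther; split_ifs with h
  · subst h; decide
  · exact h

theorem dyck_ports_agree (word : String) : is_a_dyck_word word = is_a_dyck_word_alt word := by
  unfold is_a_dyck_word is_a_dyck_word_alt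
  rcases hcs : word.toList with _ | ⟨o, rest⟩
  · simp [dyckLoopA]
  · have hstep : dyckLoopA (o :: rest) 0 '.' false '.' 0 = dyckLoopA rest 1 o false '.' 1 := by
      simp [dyckLoopA]
    rw [hstep]
    rcases hfind : (o :: rest).find? (fun ch => ch != o) with _ | c
    · simp only [hfind]
      have hall : ∀ x ∈ o :: rest, x = o := by
        intro x hx
        have := List.find?_eq_none.mp hfind x hx
        simpa using this
      rw [dyckLoopA_run o (dyckOther o) (dyckOther_ne o) rest 1 false '.' 1 (by omega) (by omega)
        (by simp) (fun ch hch => Or.inl (hall ch (by simp [hch])))]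
      exact dyck_ones o rest 1 (by omega) (fun x hx => hall x (by simp [hx]))
    · simp only [hfind]
      have hcmem : c ∈ o :: rest := List.mem_of_find?_eq_some hfind
      have hco : ¬ c = o := by simpa using List.find?_some hfind
      by_cases hthird : ∃ z ∈ o :: rest, ¬ z = o ∧ ¬ z = c
      · obtain ⟨z, hz, hzo, hzc⟩ := hthird
        have hzr : z ∈ rest := by
          rcases List.mem_cons.mp hz with h | h
          · exact absurd h hzo
          · exact h
        have hcr : c ∈ rest := by
          rcases List.mem_cons.mp hcmem with h | h
          · exact absurd h hco
          · exact h
        rw [dyckLoopA_badN o rest 1 '.' 1 (by omega)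
          ⟨c, hcr, z, hzr, hco, hzo, fun h => hzc h.symm⟩]
        have hmem := dyck_loop_mem o c z hzo hzc (o :: rest).length (o :: rest) le_rfl hz
        have hne : ¬ (dyckCancelLoop o c (o :: rest) = []) := fun h => by simp [h] at hmem
        simp [hne]
      · push Not at hthird
        have hcov : ∀ x ∈ o :: rest, x = o ∨ x = c := by
          intro x hx
          by_cases hxo : x = o
          · exact Or.inl hxo
          · exact Or.inr (hthird x hx hxo)
        rw [dyckLoopA_run o c (fun h => hco h.symm) rest 1 false '.' 1 (by omega) (by omega)
          (by simp) (fun ch hch => hcov ch (by simp [hch]))]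
        have hnp := dyck_loop_no_pair o c (o :: rest).length (o :: rest) le_rfl
        have hcov' : ∀ x ∈ dyckCancelLoop o c (o :: rest), x = o ∨ x = c := fun x hx =>
          hcov x (dyck_loop_subset o c (o :: rest).length (o :: rest) le_rfl x hx)
        have hinv := dyck_loop_run o c hco (o :: rest).length (o :: rest) le_rfl
        rw [dyck_no_pair_run o c hco (dyckCancelLoop o c (o :: rest)) hcov' hnp] at hinv
        rw [hinv]
        simp only [dyckVals, List.map_cons, dyckRun]
        norm_num

-- ===== VERDICT (by name: the statement is the Claim_ definition above) =====
theorem is_a_dyck_word_spec : Claim_equal_is_a_dyck_word := by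
  unfold Claim_equal_is_a_dyck_word Spec_is_a_dyck_word
  intro word _
  exact dyck_ports_agree word
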